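-- pv_equiv track=rewrite | github.com/bharath13211/Pikachu | pikachu.py | move_W_right
-- ===== SOURCE A (Python) =====
-- import copy
--
-- def move_W_right(board, player, N, r, c):
--     temp_board = copy.deepcopy(board)
--     if r < N and r >= 0 and c < N - 2 and c >= 0 and temp_board[r][c] == 'W':
--         for j in range(c + 1, N-1):
--             if (temp_board[r][j] == 'b' or temp_board[r][j] == 'B') and temp_board[r][j + 1] == '.':
--                 list = []
--                 for k in range(c + 1, j):
--                     if temp_board[r][k] == 'w' or temp_board[r][k] == 'W':
--                         list.append('N')
--                     elif temp_board[r][k] == '.':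
--                         list.append('Y')
--                 if 'N' not in list:
--                     temp_board[r][j + 1] = 'W'
--                     temp_board[r][j] = '.'
--                     temp_board[r][c] = '.'
--     return temp_board
-- ===== SOURCE B (Python) =====
-- import copy
--
-- def move_W_right(board, player, N, r, c):
--     temp_board = copy.deepcopy(board)
--     if r < N and r >= 0 and c < N - 2 and c >= 0 and temp_board[r][c] == 'W':
--         blocked = False
--         for j in range(c + 1, N - 1):
--             if (temp_board[r][j] == 'b' or temp_board[r][j] == 'B') and temp_board[r][j + 1] == '.' and not blocked:
--                 temp_board[r][j + 1] = 'W'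
--                 temp_board[r][j] = '.'
--                 temp_board[r][c] = '.'
--             if temp_board[r][j] == 'w' or temp_board[r][j] == 'W':
--                 blocked = True
--     return temp_board
-- ===== Notes on version B (the rewrite author's own statement) =====
-- stated objective: simpler
-- what changed: Replaces the per-j inner rescan of positions c+1..j-1 (building a list of 'N'/'Y' marks and testing membership) with a single running boolean 'blocked' updated once per cell after it is processed, turning the quadratic sweep into one linear pass.
import Mathlib
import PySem

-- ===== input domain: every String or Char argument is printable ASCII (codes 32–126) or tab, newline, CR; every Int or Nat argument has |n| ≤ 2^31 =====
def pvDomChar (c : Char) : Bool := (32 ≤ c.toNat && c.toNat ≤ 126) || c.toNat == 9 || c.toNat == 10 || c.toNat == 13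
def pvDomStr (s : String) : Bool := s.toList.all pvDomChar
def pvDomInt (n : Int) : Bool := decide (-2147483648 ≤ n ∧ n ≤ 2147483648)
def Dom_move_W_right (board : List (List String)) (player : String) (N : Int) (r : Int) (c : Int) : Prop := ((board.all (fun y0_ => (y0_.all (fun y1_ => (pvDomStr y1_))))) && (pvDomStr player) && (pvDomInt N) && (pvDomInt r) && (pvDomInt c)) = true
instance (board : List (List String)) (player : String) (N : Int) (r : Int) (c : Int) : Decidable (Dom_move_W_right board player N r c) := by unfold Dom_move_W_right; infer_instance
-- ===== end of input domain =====

-- B replaces A's per-j inner rescan (building a list of 'N'/'Y' marks and testing membership)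
-- with one running boolean maintained across the sweep; same return value, simpler single pass.


-- ===== PORT A =====
-- temp_board[r][j] read, totalized with "" (inside Pre_ every read Python performs is in range)
def getCell (b : List (List String)) (r j : Int) : String :=
  match PySem.List.pyGet? b r with
  | some row => (PySem.List.pyGet? row j).getD ""
  | none => ""

-- temp_board[r][j] = v (inside Pre_ every write Python performs is in range, indices nonnegative)
def setCell (b : List (List String)) (r j : Int) (v : String) : List (List String) :=
  b.set r.toNat (((b[r.toNat]?).getD []).set j.toNat v)

def move_W_right (board : List (List String)) (player : String) (N : Int) (r : Int) (c : Int) : List (List String) :=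
  -- temp_board = copy.deepcopy(board): immutable values, so temp_board is board itself
  if r < N ∧ 0 ≤ r ∧ c < N - 2 ∧ 0 ≤ c ∧ getCell board r c = "W" then
    (PySem.List.pyRange (c + 1) (N - 1) 1).foldl (fun tb j =>
      if (getCell tb r j = "b" ∨ getCell tb r j = "B") ∧ getCell tb r (j + 1) = "." then
        let lst : List String :=
          (PySem.List.pyRange (c + 1) j 1).foldl (fun l k =>
            if getCell tb r k = "w" ∨ getCell tb r k = "W" then l ++ ["N"]
            else if getCell tb r k = "." then l ++ ["Y"]
            else l) []
        if "N" ∉ lst then setCell (setCell (setCell tb r (j + 1) "W") r j ".") r c "."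
        else tb
      else tb) board
  else board

-- ===== PORT B =====
def move_W_right_alt (board : List (List String)) (player : String) (N : Int) (r : Int) (c : Int) : List (List String) :=
  -- temp_board = copy.deepcopy(board): immutable values, so temp_board is board itself
  if r < N ∧ 0 ≤ r ∧ c < N - 2 ∧ 0 ≤ c ∧ getCell board r c = "W" then
    ((PySem.List.pyRange (c + 1) (N - 1) 1).foldl (fun (st : List (List String) × Bool) j =>
      let tb := st.1
      let blocked := st.2
      let tb' :=
        if (getCell tb r j = "b" ∨ getCell tb r j = "B") ∧ getCell tb r (j + 1) = "." ∧ blocked = false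
        then setCell (setCell (setCell tb r (j + 1) "W") r j ".") r c "."
        else tb
      (tb', blocked || decide (getCell tb' r j = "w" ∨ getCell tb' r j = "W"))) (board, false)).1
  else board

-- ===== PRECONDITION & SPEC =====
-- Pre_ excludes exactly the IndexError inputs: when the function's guard holds, Python indexes
-- board[r][c], and if that cell is 'W' the sweep indexes board[r][c+1 .. N-1].
def Pre_move_W_right (board : List (List String)) (player : String) (N : Int) (r : Int) (c : Int) : Prop :=
  (0 ≤ r ∧ r < N ∧ 0 ≤ c ∧ c < N - 2) →
    (r < (board.length : Int) ∧
      c < (((board[r.toNat]?).getD []).length : Int) ∧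
      (PySem.List.pyGet? ((board[r.toNat]?).getD []) c = some "W" →
        N ≤ (((board[r.toNat]?).getD []).length : Int)))
instance (board : List (List String)) (player : String) (N : Int) (r : Int) (c : Int) : Decidable (Pre_move_W_right board player N r c) := by unfold Pre_move_W_right; infer_instance

def pvWitness_move_W_right : List (List String) × String × Int × Int × Int :=
  ([["W", "b", ".", "."]], "w", 4, 0, 0)

def Spec_move_W_right (board : List (List String)) (player : String) (N : Int) (r : Int) (c : Int) (out : List (List String)) : Prop := out = move_W_right_alt board player N r c
instance (board : List (List String)) (player : String) (N : Int) (r : Int) (c : Int) (out : List (List String)) : Decidable (Spec_move_W_right board player N r c out) := by unfold Spec_move_W_right; infer_instance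

-- ===== CLAIM (what is proved, stated in full; the proofs are below) =====
def Claim_equal_move_W_right : Prop := ∀ (board : List (List String)) (player : String) (N : Int) (r : Int) (c : Int), Dom_move_W_right board player N r c → Pre_move_W_right board player N r c → Spec_move_W_right board player N r c (move_W_right board player N r c)

-- ===== LEMMAS AND PROOFS =====

-- reading a cell the write did not touch (same row, different nonnegative column)
theorem getCell_setCell_ne (b : List (List String)) (r i k : Int) (v : String)
    (hr : 0 ≤ r) (hi : 0 ≤ i) (hk : 0 ≤ k) (hik : i ≠ k) :
    getCell (setCell b r i v) r k = getCell b r k := by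
  unfold getCell setCell
  simp only [PySem.List.pyGet?_of_nonneg _ hr, PySem.List.pyGet?_of_nonneg _ hk,
    List.getElem?_set_self']
  cases h : b[r.toNat]? with
  | none => simp
  | some row => simp [List.getElem?_set_ne (show i.toNat ≠ k.toNat by omega)]

theorem getCell_setCell_self (b : List (List String)) (r i : Int) (v : String)
    (hr : 0 ≤ r) (hi : 0 ≤ i) :
    getCell (setCell b r i v) r i = v ∨ getCell (setCell b r i v) r i = getCell b r i := by
  unfold getCell setCell
  simp only [PySem.List.pyGet?_of_nonneg _ hr, PySem.List.pyGet?_of_nonneg _ hi,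
    List.getElem?_set_self']
  cases h : b[r.toNat]? with
  | none => right; simp
  | some row =>
    cases hrow : row[i.toNat]? with
    | none => right; simp [List.getElem?_set_self', hrow]
    | some x => left; simp [List.getElem?_set_self', hrow]

-- membership of 'N' in A's inner scan list
theorem mem_inner_list (tb : List (List String)) (r : Int) (ks : List Int) (init : List String) :
    ("N" ∈ ks.foldl (fun l k =>
        if getCell tb r k = "w" ∨ getCell tb r k = "W" then l ++ ["N"]
        else if getCell tb r k = "." then l ++ ["Y"]
        else l) init) ↔
      ("N" ∈ init ∨ ∃ k ∈ ks, (getCell tb r k = "w" ∨ getCell tb r k = "W")) := by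
  induction ks generalizing init with
  | nil => simp
  | cons k ks ih =>
    simp only [List.foldl_cons]
    split_ifs with h1 h2 <;> rw [ih] <;> simp [h1]

-- main loop invariant: B's running flag equals 'A's inner scan would find a w/W'
theorem loop_eq (r c N : Int) (hr : 0 ≤ r) (hc : 0 ≤ c) :
    ∀ (n : Nat) (a : Int) (tb : List (List String)) (blocked : Bool),
      c + 1 ≤ a → n = (N - 1 - a).toNat →
      (blocked = true ↔ ∃ k, c + 1 ≤ k ∧ k < a ∧ (getCell tb r k = "w" ∨ getCell tb r k = "W")) →
      (PySem.List.pyRange a (N - 1) 1).foldl (fun tb j =>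
        if (getCell tb r j = "b" ∨ getCell tb r j = "B") ∧ getCell tb r (j + 1) = "." then
          let lst : List String :=
            (PySem.List.pyRange (c + 1) j 1).foldl (fun l k =>
              if getCell tb r k = "w" ∨ getCell tb r k = "W" then l ++ ["N"]
              else if getCell tb r k = "." then l ++ ["Y"]
              else l) []
          if "N" ∉ lst then setCell (setCell (setCell tb r (j + 1) "W") r j ".") r c "."
          else tb
        else tb) tb
      = ((PySem.List.pyRange a (N - 1) 1).foldl (fun (st : List (List String) × Bool) j =>
          let tb := st.1
          let blocked := st.2
          let tb' :=
            if (getCell tb r j = "b" ∨ getCell tb r j = "B") ∧ getCell tb r (j + 1) = "." ∧ blocked = false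
            then setCell (setCell (setCell tb r (j + 1) "W") r j ".") r c "."
            else tb
          (tb', blocked || decide (getCell tb' r j = "w" ∨ getCell tb' r j = "W"))) (tb, blocked)).1 := by
  intro n
  induction n with
  | zero =>
    intro a tb blocked ha hn hinv
    rw [PySem.List.pyRange_one_eq_nil (by omega)]; rfl
  | succ n ih =>
    intro a tb blocked ha hn hinv
    by_cases hlt : a < N - 1
    · have ha1 : c + 1 ≤ a + 1 := by omega
      have hn1 : n = (N - 1 - (a + 1)).toNat := by clear hinv ih; omega
      rw [PySem.List.pyRange_one_cons hlt]
      simp only [List.foldl_cons]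
      -- the value of A's inner membership test at j = a
      have hNmem : (("N" : String) ∈
          (PySem.List.pyRange (c + 1) a 1).foldl (fun l k =>
            if getCell tb r k = "w" ∨ getCell tb r k = "W" then l ++ ["N"]
            else if getCell tb r k = "." then l ++ ["Y"]
            else l) []) ↔ blocked = true := by
        rw [mem_inner_list, hinv]
        simp only [List.not_mem_nil, false_or, PySem.List.mem_pyRange_one]
        constructor
        · rintro ⟨k, ⟨h1, h2⟩, h3⟩; exact ⟨k, h1, h2, h3⟩
        · rintro ⟨k, h1, h2, h3⟩; exact ⟨k, ⟨h1, h2⟩, h3⟩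
      -- the common mutated board and facts about its row-r cells
      set mtb := setCell (setCell (setCell tb r (a + 1) "W") r a ".") r c "." with hmtb
      have hmtb_lo : ∀ k, c + 1 ≤ k → k < a → getCell mtb r k = getCell tb r k := by
        intro k h1 h2
        rw [hmtb, getCell_setCell_ne _ _ _ _ _ hr hc (by omega) (by omega),
          getCell_setCell_ne _ _ _ _ _ hr (by omega) (by omega) (by omega),
          getCell_setCell_ne _ _ _ _ _ hr (by omega) (by omega) (by omega)]
      have hmtb_a : getCell mtb r a = "." ∨ getCell mtb r a = getCell tb r a := by
        rw [hmtb, getCell_setCell_ne _ _ _ _ _ hr hc (by omega) (by omega)]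
        rcases getCell_setCell_self (setCell tb r (a + 1) "W") r a "." hr (by omega) with h | h
        · exact Or.inl h
        · rw [h, getCell_setCell_ne _ _ _ _ _ hr (by omega) (by omega) (by omega)]
          exact Or.inr rfl
      by_cases hcond : (getCell tb r a = "b" ∨ getCell tb r a = "B") ∧ getCell tb r (a + 1) = "."
      · by_cases hbl : blocked = false
        · -- mutation fires on both sides
          subst hbl
          have hb' : (false : Bool) ≠ true := by simp
          rw [if_pos hcond, if_pos (by simp [hNmem]),
            if_pos ⟨hcond.1, hcond.2, rfl⟩]
          have hmtbw : ¬ (getCell mtb r a = "w" ∨ getCell mtb r a = "W") := by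
            rcases hmtb_a with h | h <;> rcases hcond.1 with h2 | h2 <;> simp [h, h2]
          refine ih (a + 1) mtb (false || decide (getCell mtb r a = "w" ∨ getCell mtb r a = "W"))
            ha1 hn1 ?_
          simp only [Bool.false_or, decide_eq_true_eq, hmtbw]
          constructor
          · intro h; exact h.elim
          · rintro ⟨k, h1, h2, h3⟩
            by_cases hk : k = a
            · exact absurd (hk ▸ h3) hmtbw
            · have h2' : k < a := by omega
              rw [hmtb_lo k h1 h2'] at h3
              exact absurd (hinv.mpr ⟨k, h1, h2', h3⟩) hb'
        · -- blocked: neither side mutates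
          have hbt : blocked = true := by simpa using hbl
          rw [if_pos hcond, if_neg (by simp [hNmem, hbt]), if_neg (by simp [hbt])]
          refine ih (a + 1) tb (blocked || decide (getCell tb r a = "w" ∨ getCell tb r a = "W"))
            ha1 hn1 ?_
          simp only [Bool.or_eq_true, decide_eq_true_eq, hinv]
          constructor
          · rintro (⟨k, h1, h2, h3⟩ | hp)
            · exact ⟨k, h1, by omega, h3⟩
            · exact ⟨a, by omega, by omega, hp⟩
          · rintro ⟨k, h1, h2, h3⟩
            by_cases hk : k = a
            · exact Or.inr (hk ▸ h3)
            · exact Or.inl ⟨k, h1, by omega, h3⟩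
      · -- condition false: neither side mutates
        rw [if_neg hcond, if_neg (fun h => hcond ⟨h.1, h.2.1⟩)]
        refine ih (a + 1) tb (blocked || decide (getCell tb r a = "w" ∨ getCell tb r a = "W"))
          ha1 hn1 ?_
        simp only [Bool.or_eq_true, decide_eq_true_eq, hinv]
        constructor
        · rintro (⟨k, h1, h2, h3⟩ | hp)
          · exact ⟨k, h1, by omega, h3⟩
          · exact ⟨a, by omega, by omega, hp⟩
        · rintro ⟨k, h1, h2, h3⟩
          by_cases hk : k = a
          · exact Or.inr (hk ▸ h3)
          · exact Or.inl ⟨k, h1, by omega, h3⟩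
    · rw [PySem.List.pyRange_one_eq_nil (by omega)]; rfl

-- ===== VERDICT (by name: the statement is the Claim_ definition above) =====
theorem move_W_right_spec : Claim_equal_move_W_right := by
  intro board player N r c hdom hpre
  unfold Spec_move_W_right move_W_right move_W_right_alt
  by_cases hg : r < N ∧ 0 ≤ r ∧ c < N - 2 ∧ 0 ≤ c ∧ getCell board r c = "W"
  · rw [if_pos hg, if_pos hg]
    have hinv0 : (false = true) ↔
        ∃ k, c + 1 ≤ k ∧ k < c + 1 ∧ (getCell board r k = "w" ∨ getCell board r k = "W") := by
      simp only [Bool.false_eq_true, false_iff, not_exists]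
      intro k
      rintro ⟨h1, h2, -⟩
      omega
    exact loop_eq r c N hg.2.1 hg.2.2.2.1 ((N - 1 - (c + 1)).toNat) (c + 1) board false
      (by omega) rfl hinv0
  · rw [if_neg hg, if_neg hg]
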